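-- pv_equiv track=rewrite | github.com/baloncek2662/advent-of-code-2024 | solutions/day_09.py | only_space_remaining
-- ===== SOURCE A (Python) =====
-- def only_space_remaining(disk_map):
--     first_space_found = False
--     for el in disk_map:
--         if first_space_found and el != ".":
--             return False
--         if el == ".":
--             first_space_found = True
--     return True
-- ===== SOURCE B (Python) =====
-- def only_space_remaining(disk_map):
--     first_dot = None
--     last_content = None
--     i = 0
--     for el in disk_map:
--         if el == ".":
--             if first_dot is None:
--                 first_dot = i
--         else:
--             last_content = i
--         i += 1
--     if first_dot is None or last_content is None:
--         return True
--     return last_content < first_dot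
-- ===== Notes on version B (the rewrite author's own statement) =====
-- stated objective: alternative
-- what changed: Replaces the flag-plus-early-return scan with a positional scan that records the first '.' index and the last non-'.' index and ends with a single closed comparison last_content < first_dot.
import Mathlib
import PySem

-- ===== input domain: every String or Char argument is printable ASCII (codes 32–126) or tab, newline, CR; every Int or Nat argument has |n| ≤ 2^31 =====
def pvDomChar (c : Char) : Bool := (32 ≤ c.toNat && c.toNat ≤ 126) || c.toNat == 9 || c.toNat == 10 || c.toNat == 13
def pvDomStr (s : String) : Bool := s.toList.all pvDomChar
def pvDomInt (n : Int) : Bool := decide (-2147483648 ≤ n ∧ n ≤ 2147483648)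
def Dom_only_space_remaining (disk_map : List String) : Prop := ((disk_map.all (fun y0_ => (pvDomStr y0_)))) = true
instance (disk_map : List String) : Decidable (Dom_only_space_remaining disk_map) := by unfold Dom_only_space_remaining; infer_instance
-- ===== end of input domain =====

-- B replaces A's flag-plus-early-return scan with a positional scan (first '.' index vs last
-- non-'.' index) and one final comparison; same behaviour, different decomposition.

-- ===== PORT A =====
def only_space_remaining_go (first_space_found : Bool) : List String → Bool
  | [] => true
  | el :: rest =>
    if first_space_found && !(el == ".") then false
    else only_space_remaining_go (if el == "." then true else first_space_found) rest

def only_space_remaining (disk_map : List String) : Bool :=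
  only_space_remaining_go false disk_map

-- ===== PORT B =====
def only_space_remaining_alt_loop (i : Nat) (first_dot last_content : Option Nat) :
    List String → Option Nat × Option Nat
  | [] => (first_dot, last_content)
  | el :: rest =>
    if el == "." then
      only_space_remaining_alt_loop (i + 1)
        (match first_dot with | none => some i | some f => some f) last_content rest
    else
      only_space_remaining_alt_loop (i + 1) first_dot (some i) rest

def only_space_remaining_alt (disk_map : List String) : Bool :=
  match only_space_remaining_alt_loop 0 none none disk_map with
  | (none, _) => true
  | (_, none) => true
  | (some f, some c) => decide (c < f)

-- ===== PRECONDITION & SPEC =====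
def Spec_only_space_remaining (disk_map : List String) (out : Bool) : Prop := out = only_space_remaining_alt disk_map
instance (disk_map : List String) (out : Bool) : Decidable (Spec_only_space_remaining disk_map out) := by unfold Spec_only_space_remaining; infer_instance

-- ===== CLAIM (what is proved, stated in full; the proofs are below) =====
def Claim_equal_only_space_remaining : Prop := ∀ (disk_map : List String), Dom_only_space_remaining disk_map → Spec_only_space_remaining disk_map (only_space_remaining disk_map)

-- ===== LEMMAS AND PROOFS =====

-- finalization of B's loop result
def pvFinalize (p : Option Nat × Option Nat) : Bool :=
  match p with
  | (none, _) => true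
  | (_, none) => true
  | (some f, some c) => decide (c < f)

theorem alt_eq_finalize (l : List String) :
    only_space_remaining_alt l = pvFinalize (only_space_remaining_alt_loop 0 none none l) := by
  rfl

-- A with the flag already set returns true iff everything remaining is "."
theorem goA_true (l : List String) :
    only_space_remaining_go true l = l.all (fun el => el == ".") := by
  induction l with
  | nil => rfl
  | cons el rest ih =>
    by_cases h : el = "."
    · simp [only_space_remaining_go, h, ih, List.all_cons]
    · simp [only_space_remaining_go, h, List.all_cons]

-- B with first_dot = some f and last_content already ≥ f finalizes to false
theorem loopB_false (l : List String) (i f c : Nat) (hf : f ≤ c) (hi : f ≤ i) :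
    pvFinalize (only_space_remaining_alt_loop i (some f) (some c) l) = false := by
  induction l generalizing i c with
  | nil => simp [only_space_remaining_alt_loop, pvFinalize]; omega
  | cons el rest ih =>
    by_cases h : el = "."
    · simpa [only_space_remaining_alt_loop, h] using ih (i + 1) c hf (by omega)
    · simpa [only_space_remaining_alt_loop, h] using ih (i + 1) i hi (by omega)

-- B with first_dot = some f (and last_content either absent or < f) finalizes to "all dots"
theorem loopB_true (l : List String) (i f : Nat) (lc : Option Nat)
    (hlc : ∀ c, lc = some c → c < f) (hi : f ≤ i) :
    pvFinalize (only_space_remaining_alt_loop i (some f) lc l) =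
      l.all (fun el => el == ".") := by
  induction l generalizing i lc with
  | nil =>
    cases lc with
    | none => rfl
    | some c =>
      have := hlc c rfl
      simp [only_space_remaining_alt_loop, pvFinalize, List.all_nil]
      omega
  | cons el rest ih =>
    by_cases h : el = "."
    · simpa [only_space_remaining_alt_loop, h, List.all_cons] using ih (i + 1) lc hlc (by omega)
    · have : pvFinalize (only_space_remaining_alt_loop (i + 1) (some f) (some i) rest) = false :=
        loopB_false rest (i + 1) f i hi (by omega)
      simp [only_space_remaining_alt_loop, h, List.all_cons, this]

-- main invariant: with first_dot still unset, B's finalized loop agrees with A's scan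
theorem loopB_main (l : List String) (i : Nat) (lc : Option Nat)
    (hlc : ∀ c, lc = some c → c < i) :
    pvFinalize (only_space_remaining_alt_loop i none lc l) =
      only_space_remaining_go false l := by
  induction l generalizing i lc with
  | nil =>
    cases lc <;> rfl
  | cons el rest ih =>
    by_cases h : el = "."
    · have hb : pvFinalize (only_space_remaining_alt_loop (i + 1) (some i) lc rest) =
          rest.all (fun el => el == ".") :=
        loopB_true rest (i + 1) i lc (fun c hc => hlc c hc) (by omega)
      simp [only_space_remaining_alt_loop, h, hb, only_space_remaining_go, goA_true]
    · have hb := ih (i + 1) (some i) (by intro c hc; cases hc; omega)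
      simpa [only_space_remaining_alt_loop, h, only_space_remaining_go] using hb

-- ===== VERDICT (by name: the statement is the Claim_ definition above) =====
theorem only_space_remaining_spec : Claim_equal_only_space_remaining := by
  intro disk_map _
  unfold Spec_only_space_remaining
  rw [alt_eq_finalize, loopB_main disk_map 0 none (by intro c hc; cases hc)]
  rfl
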